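-- pv_equiv track=rewrite | github.com/yyytae0/algorithm-training | programmers/1-10.py | solution
-- ===== SOURCE A (Python) =====
-- def solution(answers):
--     answer = []
--     lst1 = [1, 2, 3, 4, 5]
--     lst2 = [2, 1, 2, 3, 2, 4, 2, 5]
--     lst3 = [3, 3, 1, 1, 2, 2, 4, 4, 5, 5]
--     cnt = [[1, 0], [2, 0], [3, 0]]
--     for idx, i in enumerate(answers):
--         if i == lst1[idx % 5]:
--             cnt[0][1] += 1
--         if i == lst2[idx % 8]:
--             cnt[1][1] += 1
--         if i == lst3[idx % 10]:
--             cnt[2][1] += 1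
--     cnt.sort(key=lambda x: (-x[1], x[0]))
--     mx = cnt[0][1]
--     for i in range(3):
--         if cnt[i][1] >= mx:
--             answer.append(cnt[i][0])
--
--     return answer
-- ===== SOURCE B (Python) =====
-- def solution(answers):
--     patterns = [[1, 2, 3, 4, 5],
--                 [2, 1, 2, 3, 2, 4, 2, 5],
--                 [3, 3, 1, 1, 2, 2, 4, 4, 5, 5]]
--     # Histogram of (position mod 40, value): 40 = lcm of the pattern periods,
--     # so each pattern's score is a sum of 40 histogram lookups.
--     freq = {}
--     for i, a in enumerate(answers):
--         key = (i % 40, a)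
--         freq[key] = freq.get(key, 0) + 1
--     scores = [sum(freq.get((j, p[j % len(p)]), 0) for j in range(40))
--               for p in patterns]
--     best = max(scores)
--     return [k + 1 for k in range(3) if scores[k] == best]
-- ===== Notes on version B (the rewrite author's own statement) =====
-- stated objective: alternative
-- what changed: B replaces A's per-element triple comparison plus sort-then-threshold by a different algorithm: it builds a histogram keyed by (index mod 40, value) (40 = lcm of the pattern periods) in one pass, computes each pattern's score as a sum of 40 histogram lookups, and returns the ids attaining the max via a direct filter instead of A's sort.
import Mathlib
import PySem

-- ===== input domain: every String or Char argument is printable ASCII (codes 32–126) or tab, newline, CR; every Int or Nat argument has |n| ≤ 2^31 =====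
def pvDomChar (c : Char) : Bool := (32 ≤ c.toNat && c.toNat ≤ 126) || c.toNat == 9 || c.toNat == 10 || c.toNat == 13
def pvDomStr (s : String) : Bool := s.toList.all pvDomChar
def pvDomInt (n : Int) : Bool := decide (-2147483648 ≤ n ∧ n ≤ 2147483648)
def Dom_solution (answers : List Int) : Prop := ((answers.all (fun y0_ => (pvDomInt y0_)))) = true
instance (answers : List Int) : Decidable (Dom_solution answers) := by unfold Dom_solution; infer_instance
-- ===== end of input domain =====

-- B computes the scores from a histogram keyed by (index mod 40, value) — 40 = lcm of the
-- three pattern periods — instead of A's per-element triple comparison, and picks the winners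
-- by max-then-filter instead of A's sort-then-threshold (objective: alternative algorithm).

-- ===== PORT A =====
-- cnt[k][1] += 1 on the list of [id, count] pairs
def pvBump (cnt : List (Int × Int)) (k : Nat) : List (Int × Int) :=
  cnt.modify k (fun p => (p.1, p.2 + 1))

def solution (answers : List Int) : List Int :=
  let lst1 : List Int := [1, 2, 3, 4, 5]
  let lst2 : List Int := [2, 1, 2, 3, 2, 4, 2, 5]
  let lst3 : List Int := [3, 3, 1, 1, 2, 2, 4, 4, 5, 5]
  let cnt : List (Int × Int) :=
    (PySem.List.enumerate answers 0).foldl (fun cnt ii =>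
      let cnt := if PySem.List.pyGet? lst1 (PySem.Int.mod ii.1 5) = some ii.2 then pvBump cnt 0 else cnt
      let cnt := if PySem.List.pyGet? lst2 (PySem.Int.mod ii.1 8) = some ii.2 then pvBump cnt 1 else cnt
      let cnt := if PySem.List.pyGet? lst3 (PySem.Int.mod ii.1 10) = some ii.2 then pvBump cnt 2 else cnt
      cnt) [(1, 0), (2, 0), (3, 0)]
  let cnt := PySem.List.sorted2 cnt (fun x => -x.2) (fun x => x.1) false
  let mx := ((PySem.List.pyGet? cnt 0).getD (0, 0)).2
  (PySem.List.pyRange 0 3 1).foldl (fun answer i =>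
    let p := (PySem.List.pyGet? cnt i).getD (0, 0)
    if p.2 ≥ mx then answer ++ [p.1] else answer) []

-- ===== PORT B =====
def solution_alt (answers : List Int) : List Int :=
  let patterns : List (List Int) :=
    [[1, 2, 3, 4, 5], [2, 1, 2, 3, 2, 4, 2, 5], [3, 3, 1, 1, 2, 2, 4, 4, 5, 5]]
  -- freq[(i % 40, a)] += 1
  let freq : PySem.Dict (Int × Int) Int :=
    (PySem.List.enumerate answers 0).foldl (fun d ia =>
      let key := (PySem.Int.mod ia.1 40, ia.2)
      d.insert key (d.getD key 0 + 1)) PySem.Dict.empty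
  -- sum(freq.get((j, p[j % len(p)]), 0) for j in range(40));  p[j % len(p)] never raises
  -- (0 ≤ j % len(p) < len(p)), so the total pyGetD with default 0 is exact here
  let scores : List Int := patterns.map (fun p =>
    (PySem.List.pyRange 0 40 1).foldl (fun s j =>
      s + freq.getD (j, PySem.List.pyGetD p (PySem.Int.mod j (p.length : Int)) 0) 0) 0)
  let best := (PySem.List.max? scores (fun x => x)).getD 0
  (PySem.List.pyRange 0 3 1).foldl (fun acc k =>
    if PySem.List.pyGetD scores k 0 = best then acc ++ [k + 1] else acc) []

-- ===== PRECONDITION & SPEC =====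
def Spec_solution (answers : List Int) (out : List Int) : Prop := out = solution_alt answers
instance (answers : List Int) (out : List Int) : Decidable (Spec_solution answers out) := by unfold Spec_solution; infer_instance

-- ===== CLAIM (what is proved, stated in full; the proofs are below) =====
def Claim_equal_solution : Prop := ∀ (answers : List Int), Dom_solution answers → Spec_solution answers (solution answers)

-- ===== LEMMAS AND PROOFS =====

-- the per-pattern tally A keeps inline (score of pattern p with period L on (enumerate l s))
def pvTally (p : List Int) (L : Int) (l : List Int) (s : Int) : Int :=
  (PySem.List.enumerate l s).foldl (fun t ia =>
    t + (if PySem.List.pyGet? p (PySem.Int.mod ia.1 L) = some ia.2 then 1 else 0)) 0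

theorem score_one (g : Int × Int → Int) (l : List (Int × Int)) :
    l.foldl (fun s ia => s + g ia) 1 = 1 + l.foldl (fun s ia => s + g ia) 0 := by
  simp [PySem.List.foldl_add]

theorem bump0 (a b c : Int) : pvBump [(1,a),(2,b),(3,c)] 0 = [(1,a+1),(2,b),(3,c)] := rfl
theorem bump1 (a b c : Int) : pvBump [(1,a),(2,b),(3,c)] 1 = [(1,a),(2,b+1),(3,c)] := rfl
theorem bump2 (a b c : Int) : pvBump [(1,a),(2,b),(3,c)] 2 = [(1,a),(2,b),(3,c+1)] := rfl

-- A's tally loop computes the three pvTally's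
theorem tally_eq (l : List Int) : ∀ (s a b c : Int),
    (PySem.List.enumerate l s).foldl (fun cnt ii =>
      let cnt := if PySem.List.pyGet? [(1:Int),2,3,4,5] (PySem.Int.mod ii.1 5) = some ii.2 then pvBump cnt 0 else cnt
      let cnt := if PySem.List.pyGet? [(2:Int),1,2,3,2,4,2,5] (PySem.Int.mod ii.1 8) = some ii.2 then pvBump cnt 1 else cnt
      let cnt := if PySem.List.pyGet? [(3:Int),3,1,1,2,2,4,4,5,5] (PySem.Int.mod ii.1 10) = some ii.2 then pvBump cnt 2 else cnt
      cnt) [(1, a), (2, b), (3, c)]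
    = [(1, a + pvTally [1,2,3,4,5] 5 l s),
       (2, b + pvTally [2,1,2,3,2,4,2,5] 8 l s),
       (3, c + pvTally [3,3,1,1,2,2,4,4,5,5] 10 l s)] := by
  induction l with
  | nil => intro s a b c; simp [PySem.List.enumerate, pvTally]
  | cons x rest ih =>
    intro s a b c
    simp only [PySem.List.enumerate_cons, List.foldl_cons, pvTally]
    split_ifs <;>
      simp only [bump0, bump1, bump2, zero_add] <;>
      rw [ih] <;>
      simp only [pvTally, score_one, List.cons.injEq, Prod.mk.injEq] <;>
      and_intros <;> first | trivial | omega

-- indicator sum over a nodup key list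
theorem sum_ite_key (F : Int → Int) (x : Int × Int) : ∀ (ks : List Int), ks.Nodup →
    (ks.map (fun j => if ((j, F j) : Int × Int) = x then (1:Int) else 0)).sum
      = if x.1 ∈ ks ∧ x.2 = F x.1 then 1 else 0 := by
  intro ks
  induction ks with
  | nil => simp
  | cons k t ih =>
    intro hnd
    simp only [List.nodup_cons] at hnd
    simp only [List.map_cons, List.sum_cons, ih hnd.2, List.mem_cons]
    by_cases hk : x.1 = k
    · subst hk
      by_cases hv : x.2 = F x.1
      · have : ((x.1, F x.1) : Int × Int) = x := by cases x; simp_all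
        simp [this, hv, hnd.1]
      · have : ((x.1, F x.1) : Int × Int) ≠ x := by cases x; simp_all [eq_comm]
        simp [this, hv]
    · have : ((k, F k) : Int × Int) ≠ x := by cases x; simp_all [eq_comm]
      simp [this, hk]

-- B's 40-lookup sum over the histogram of a keyed list, one cons step
theorem hist_sum_cons (F : Int → Int) (x : Int × Int) (l : List (Int × Int))
    (h0 : 0 ≤ x.1) (h1 : x.1 < 40) :
    (PySem.List.pyRange 0 40 1).foldl (fun s j => s + (((x :: l).count (j, F j) : Nat) : Int)) 0
    = (PySem.List.pyRange 0 40 1).foldl (fun s j => s + ((l.count (j, F j) : Nat) : Int)) 0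
      + (if x.2 = F x.1 then 1 else 0) := by
  rw [PySem.List.foldl_add, PySem.List.foldl_add]
  have hmem : ∀ j : Int, j ∈ PySem.List.pyRange 0 40 1 →
      (((x :: l).count (j, F j) : Nat) : Int)
        = ((l.count (j, F j) : Nat) : Int) + (if ((j, F j) : Int × Int) = x then 1 else 0) := by
    intro j _
    rw [List.count_cons]
    by_cases h : x = ((j, F j) : Int × Int)
    · subst h
      simp
    · have h' : ((j, F j) : Int × Int) ≠ x := fun hc => h hc.symm
      have hb : (x == ((j, F j) : Int × Int)) = false := beq_eq_false_iff_ne.mpr h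
      simp [hb, h']
  rw [List.map_congr_left hmem, PySem.List.sum_map_add_int,
      sum_ite_key F x _ (PySem.List.nodup_pyRange_one 0 40)]
  have hx : x.1 ∈ PySem.List.pyRange 0 40 1 := by
    rw [PySem.List.mem_pyRange_one]; exact ⟨h0, h1⟩
  simp [hx]

-- Python-mod composition for a divisor of 40
theorem mod_mod_40 (i L : Int) (hL : 0 < L) (hd : L ∣ 40) :
    PySem.Int.mod (PySem.Int.mod i 40) L = PySem.Int.mod i L := by
  simp only [PySem.Int.mod_eq_emod_of_pos hL, PySem.Int.mod_eq_emod_of_pos (show (0:Int) < 40 by omega)]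
  exact Int.emod_emod_of_dvd i hd

-- in-range pyGet? versus pyGetD
theorem get_some_iff (p : List Int) (m : Int) (h0 : 0 ≤ m) (h1 : m < (p.length : Int)) (a : Int) :
    (PySem.List.pyGet? p m = some a) ↔ a = PySem.List.pyGetD p m 0 := by
  rw [PySem.List.pyGet?_eq_some_getElem p h0 h1, PySem.List.pyGetD_eq_getElem p 0 h0 h1]
  simp [eq_comm]

-- B's histogram sum for pattern p equals A's inline tally
theorem hist_eq_tally (p : List Int) (L : Int) (hL : 0 < L) (hlen : (p.length : Int) = L)
    (hd : L ∣ 40) (l : List Int) : ∀ (s : Int), 0 ≤ s →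
    (PySem.List.pyRange 0 40 1).foldl (fun sm j =>
        sm + ((((PySem.List.enumerate l s).map (fun ia => ((PySem.Int.mod ia.1 40, ia.2) : Int × Int))).count
                (j, PySem.List.pyGetD p (PySem.Int.mod j (p.length : Int)) 0) : Nat) : Int)) 0
      = pvTally p L l s := by
  rw [hlen]
  induction l with
  | nil => intro s _; simp [PySem.List.enumerate, pvTally]
  | cons x rest ih =>
    intro s hs
    have hm0 : 0 ≤ PySem.Int.mod s 40 := PySem.Int.mod_nonneg s (by omega)
    have hm1 : PySem.Int.mod s 40 < 40 := PySem.Int.mod_lt s (by omega)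
    have hL0 : 0 ≤ PySem.Int.mod s L := PySem.Int.mod_nonneg s hL
    have hL1 : PySem.Int.mod s L < L := PySem.Int.mod_lt s hL
    simp only [PySem.List.enumerate_cons, List.map_cons]
    rw [hist_sum_cons (fun j => PySem.List.pyGetD p (PySem.Int.mod j L) 0)
          (PySem.Int.mod s 40, x) _ hm0 hm1, ih (s+1) (by omega)]
    have hkey : (if x = PySem.List.pyGetD p (PySem.Int.mod (PySem.Int.mod s 40) L) 0 then (1:Int) else 0)
        = (if PySem.List.pyGet? p (PySem.Int.mod s L) = some x then 1 else 0) := by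
      rw [mod_mod_40 s L hL hd]
      by_cases h : PySem.List.pyGet? p (PySem.Int.mod s L) = some x
      · rw [if_pos h, if_pos ((get_some_iff p _ hL0 (by omega) x).mp h)]
      · rw [if_neg h, if_neg (fun hc => h ((get_some_iff p _ hL0 (by omega) x).mpr hc))]
    simp only [pvTally, PySem.List.enumerate_cons, List.foldl_cons, zero_add,
      PySem.List.foldl_add, hkey]
    omega

-- the back halves agree on any triple of scores
set_option maxHeartbeats 2000000 in
theorem back_eq (a b c : Int) :
    (let cnt := PySem.List.sorted2 [((1:Int), a), (2, b), (3, c)] (fun x => -x.2) (fun x => x.1) false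
     let mx := ((PySem.List.pyGet? cnt 0).getD (0, 0)).2
     (PySem.List.pyRange 0 3 1).foldl (fun answer i =>
       let p := (PySem.List.pyGet? cnt i).getD (0, 0)
       if p.2 ≥ mx then answer ++ [p.1] else answer) [])
    = (let best := (PySem.List.max? [a, b, c] (fun x => x)).getD 0
       (PySem.List.pyRange 0 3 1).foldl (fun acc k =>
         if PySem.List.pyGetD [a, b, c] k 0 = best then acc ++ [k + 1] else acc) []) := by
  by_cases h1 : a < b <;> by_cases h2 : b < c <;> by_cases h3 : a < c <;>
    simp [PySem.List.sorted2, PySem.List.insertBy, PySem.List.max?, PySem.List.pyRange,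
      PySem.List.pyGet?, PySem.List.pyIdx?, PySem.List.pyGetD, List.range_succ, h1, h2, h3] <;>
    split_ifs <;> first | rfl | (exfalso; omega)

-- dict counting fold read back as a count of the keyed list
theorem getD_keyfold (l : List (Int × Int)) : ∀ (d : PySem.Dict (Int × Int) Int) (k : Int × Int),
    (l.foldl (fun d ia =>
        d.insert (PySem.Int.mod ia.1 40, ia.2) (d.getD (PySem.Int.mod ia.1 40, ia.2) 0 + 1)) d).getD k 0
      = d.getD k 0 + ((l.map (fun ia => ((PySem.Int.mod ia.1 40, ia.2) : Int × Int))).count k : Int) := by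
  induction l with
  | nil => intro d k; simp
  | cons x t ih =>
    intro d k
    simp only [List.foldl_cons, List.map_cons, List.count_cons]
    rw [ih]
    by_cases h : k = ((PySem.Int.mod x.1 40, x.2) : Int × Int)
    · rw [PySem.Dict.getD_insert, if_pos h, h]
      simp only [beq_self_eq_true, if_true]
      push_cast
      omega
    · rw [PySem.Dict.getD_insert, if_neg h]
      have hb : (((PySem.Int.mod x.1 40, x.2) : Int × Int) == k) = false :=
        beq_eq_false_iff_ne.mpr (fun hc => h hc.symm)
      rw [hb]
      simp

-- ===== VERDICT (by name: the statement is the Claim_ definition above) =====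
theorem solution_spec : Claim_equal_solution := by
  intro answers _
  show solution answers = solution_alt answers
  simp only [solution, solution_alt]
  rw [tally_eq]
  have hone : ∀ (p : List Int),
      (PySem.List.pyRange 0 40 1).foldl (fun s j =>
        s + ((PySem.List.enumerate answers 0).foldl (fun d ia =>
              d.insert (PySem.Int.mod ia.1 40, ia.2) (d.getD (PySem.Int.mod ia.1 40, ia.2) 0 + 1))
              PySem.Dict.empty).getD (j, PySem.List.pyGetD p (PySem.Int.mod j (p.length : Int)) 0) 0) 0
      = (PySem.List.pyRange 0 40 1).foldl (fun s j =>
          s + ((((PySem.List.enumerate answers 0).map (fun ia => ((PySem.Int.mod ia.1 40, ia.2) : Int × Int))).count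
                  (j, PySem.List.pyGetD p (PySem.Int.mod j (p.length : Int)) 0) : Nat) : Int)) 0 := by
    intro p
    apply PySem.List.foldl_congr_mem
    intro acc j _
    rw [getD_keyfold]
    simp [PySem.Dict.empty, PySem.Dict.getD, PySem.Dict.get?]
  simp only [List.map_cons, List.map_nil, hone]
  rw [hist_eq_tally [1,2,3,4,5] 5 (by omega) (by norm_num) (by decide) answers 0 le_rfl,
      hist_eq_tally [2,1,2,3,2,4,2,5] 8 (by omega) (by norm_num) (by decide) answers 0 le_rfl,
      hist_eq_tally [3,3,1,1,2,2,4,4,5,5] 10 (by omega) (by norm_num) (by decide) answers 0 le_rfl]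
  simp only [zero_add]
  exact back_eq _ _ _
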